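-- pv_equiv track=rewrite | github.com/jiwu51510/texas-holdem-ai | training/flop_bucket_classifier.py | _calculate_connectedness
-- ===== SOURCE A (Python) =====
-- from typing import List, Dict, Any, Set, Tuple, Optional
--
-- def _calculate_connectedness(ranks: List[int]) -> int:
--     """计算连接度（相邻牌的数量）。
--
--     Args:
--         ranks: 排序后的牌面值列表
--
--     Returns:
--         连接度（0-2）
--     """
--     unique_ranks = sorted(set(ranks))
--     connectedness = 0
--
--     for i in range(len(unique_ranks) - 1):
--         if unique_ranks[i+1] - unique_ranks[i] == 1:
--             connectedness += 1
--
--     # 处理 A-2 连接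
--     if 14 in unique_ranks and 2 in unique_ranks:
--         connectedness += 1
--
--     return connectedness
-- ===== SOURCE B (Python) =====
-- def _calculate_connectedness(ranks):
--     """Successor-membership count over the distinct ranks: no sort, no indexing."""
--     s = set(ranks)
--     connectedness = sum(1 for r in s if r + 1 in s)
--     if 14 in s and 2 in s:
--         connectedness += 1
--     return connectedness
-- ===== Notes on version B (the rewrite author's own statement) =====
-- stated objective: simpler
-- what changed: Eliminates the sort and the indexed adjacent-difference loop: B builds a set once and counts ranks whose successor is also in the set (one membership pass), so consecutive pairs are found by r+1-in-S tests instead of sorting and comparing neighbours.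
import Mathlib
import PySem

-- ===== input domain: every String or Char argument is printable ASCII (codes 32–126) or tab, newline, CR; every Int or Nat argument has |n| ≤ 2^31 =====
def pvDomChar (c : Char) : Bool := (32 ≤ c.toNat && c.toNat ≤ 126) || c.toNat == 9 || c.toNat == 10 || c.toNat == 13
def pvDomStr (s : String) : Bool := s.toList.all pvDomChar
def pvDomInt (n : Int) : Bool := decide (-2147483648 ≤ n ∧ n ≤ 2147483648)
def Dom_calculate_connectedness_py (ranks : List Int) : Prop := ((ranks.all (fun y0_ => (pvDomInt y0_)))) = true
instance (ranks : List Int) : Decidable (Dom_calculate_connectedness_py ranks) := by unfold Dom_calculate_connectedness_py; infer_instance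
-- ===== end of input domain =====

-- B replaces sort + indexed adjacent-difference loop by a successor-membership count over the distinct ranks (simpler).

-- ===== PORT A =====
def calculate_connectedness_py (ranks : List Int) : Int :=
  let unique_ranks := PySem.List.sorted (PySem.Set.ofList ranks) (fun x => x) false
  let connectedness : Int := 0
  let connectedness :=
    (PySem.List.pyRange 0 ((unique_ranks.length : Int) - 1) 1).foldl
      (fun acc i =>
        if PySem.List.pyGetD unique_ranks (i + 1) 0 - PySem.List.pyGetD unique_ranks i 0 = 1
        then acc + 1 else acc) connectedness
  let connectedness :=
    if 14 ∈ unique_ranks ∧ 2 ∈ unique_ranks then connectedness + 1 else connectedness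
  connectedness

-- ===== PORT B =====
def calculate_connectedness_py_alt (ranks : List Int) : Int :=
  let s : PySem.Set Int := PySem.Set.ofList ranks
  let connectedness : Int := (s.countP (fun r => decide ((r + 1) ∈ s)) : Nat)
  let connectedness :=
    if 14 ∈ s ∧ 2 ∈ s then connectedness + 1 else connectedness
  connectedness

-- ===== PRECONDITION & SPEC =====
def Spec_calculate_connectedness_py (ranks : List Int) (out : Int) : Prop := out = calculate_connectedness_py_alt ranks
instance (ranks : List Int) (out : Int) : Decidable (Spec_calculate_connectedness_py ranks out) := by unfold Spec_calculate_connectedness_py; infer_instance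

-- ===== CLAIM (what is proved, stated in full; the proofs are below) =====
def Claim_equal_calculate_connectedness_py : Prop := ∀ (ranks : List Int), Dom_calculate_connectedness_py ranks → Spec_calculate_connectedness_py ranks (calculate_connectedness_py ranks)

-- ===== LEMMAS AND PROOFS =====

-- On a strictly increasing list, counting adjacent differences equal to 1
-- equals counting elements whose successor is also an element.
theorem pv_core (u : List Int) (hp : u.Pairwise (· < ·)) :
    (List.range (u.length - 1)).countP
      (fun k => decide (u.getD (k + 1) 0 - u.getD k 0 = 1))
    = u.countP (fun r => decide ((r + 1) ∈ u)) := by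
  induction u with
  | nil => simp
  | cons a tl ih =>
    cases tl with
    | nil => simp
    | cons b t =>
      have hab : a < b := (List.pairwise_cons.mp hp).1 b (by simp)
      have hbt : ∀ x ∈ t, b < x :=
        fun x hx => (List.pairwise_cons.mp (List.pairwise_cons.mp hp).2).1 x hx
      have hp' : (b :: t).Pairwise (· < ·) := (List.pairwise_cons.mp hp).2
      have hlen : (a :: b :: t).length - 1 = ((b :: t).length - 1) + 1 := by simp
      rw [hlen, List.range_succ_eq_map, List.countP_cons, List.countP_map]
      have hshift :
          (List.range ((b :: t).length - 1)).countP
            ((fun k => decide ((a :: b :: t).getD (k + 1) 0 - (a :: b :: t).getD k 0 = 1)) ∘ Nat.succ)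
          = (List.range ((b :: t).length - 1)).countP
            (fun k => decide ((b :: t).getD (k + 1) 0 - (b :: t).getD k 0 = 1)) := by
        apply List.countP_congr
        intro k _
        simp [Function.comp, List.getD]
      rw [hshift, ih hp']
      have hmem0 : (a + 1 ∈ (a :: b :: t)) ↔ (b - a = 1) := by
        simp only [List.mem_cons]
        constructor
        · rintro (h | h | h)
          · omega
          · omega
          · have := hbt _ h; omega
        · intro h; right; left; omega
      have hmemtail : ∀ r ∈ (b :: t), ((r + 1) ∈ (a :: b :: t)) = ((r + 1) ∈ (b :: t)) := by
        intro r hr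
        simp only [List.mem_cons] at hr
        have hrb : b ≤ r := by
          rcases hr with h | h
          · omega
          · exact le_of_lt (hbt _ h)
        simp only [List.mem_cons]
        have hne : ¬ (r + 1 = a) := by omega
        simp [hne]
      have hcnt : (b :: t).countP (fun r => decide ((r + 1) ∈ (a :: b :: t)))
          = (b :: t).countP (fun r => decide ((r + 1) ∈ (b :: t))) := by
        apply List.countP_congr
        intro r hr
        simp [hmemtail r hr]
      conv_rhs => rw [List.countP_cons]
      rw [hcnt]
      by_cases hb : b - a = 1
      · simp [List.getD, hb, hmem0.mpr hb]
      · have hna : ¬ (a + 1 ∈ (a :: b :: t)) := fun h => hb (hmem0.mp h)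
        simp [List.getD, hb, hna]

-- ===== VERDICT (by name: the statement is the Claim_ definition above) =====
theorem calculate_connectedness_py_spec : Claim_equal_calculate_connectedness_py := by
  intro ranks _
  unfold Spec_calculate_connectedness_py calculate_connectedness_py calculate_connectedness_py_alt
  set s : PySem.Set Int := PySem.Set.ofList ranks with hs
  set u : List Int := PySem.List.sorted s (fun x => x) false with hu
  have hperm : u.Perm s := PySem.List.sorted_perm s (fun x => x) false
  have hpw : u.Pairwise (· < ·) := PySem.List.sorted_ofList_pairwise_lt ranks
  have hmem : ∀ x : Int, x ∈ u ↔ x ∈ s := fun x => hperm.mem_iff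
  -- A's loop equals the Nat-count over u
  have hfold : ∀ (l : List Nat) (acc : Int),
      l.foldl (fun acc (k : Nat) =>
        if PySem.List.pyGetD u ((k : Int) + 1) 0 - PySem.List.pyGetD u (k : Int) 0 = 1
        then acc + 1 else acc) acc
      = acc + (l.countP (fun k => decide (u.getD (k + 1) 0 - u.getD k 0 = 1)) : Nat) := by
    intro l
    induction l with
    | nil => intro acc; simp
    | cons k tl ihl =>
      intro acc
      have e1 : PySem.List.pyGetD u ((k : Int) + 1) 0 = u.getD (k + 1) 0 := by
        rw [show ((k : Int) + 1) = ((k + 1 : Nat) : Int) by push_cast; ring,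
          PySem.List.pyGetD_natCast]
      have e2 : PySem.List.pyGetD u (k : Int) 0 = u.getD k 0 :=
        PySem.List.pyGetD_natCast u k 0
      simp only [List.foldl_cons, List.countP_cons, decide_eq_true_eq]
      rw [e1, e2]
      by_cases hc : u.getD (k + 1) 0 - u.getD k 0 = 1
      · rw [if_pos hc, ihl, if_pos hc]
        push_cast
        ring
      · rw [if_neg hc, ihl, if_neg hc]
        simp
  have hloop :
      (PySem.List.pyRange 0 ((u.length : Int) - 1) 1).foldl
        (fun acc i =>
          if PySem.List.pyGetD u (i + 1) 0 - PySem.List.pyGetD u i 0 = 1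
          then acc + 1 else acc) (0 : Int)
      = (u.countP (fun r => decide ((r + 1) ∈ u)) : Nat) := by
    rw [PySem.List.pyRange_one, List.foldl_map]
    simp only [zero_add]
    rw [hfold]
    have hn : (((u.length : Int) - 1 - 0).toNat) = u.length - 1 := by omega
    rw [hn, pv_core u hpw, zero_add]
  -- count over u equals count over s
  have hcount : u.countP (fun r => decide ((r + 1) ∈ u))
      = s.countP (fun r => decide ((r + 1) ∈ s)) := by
    have h1 : u.countP (fun r => decide ((r + 1) ∈ u))
        = u.countP (fun r => decide ((r + 1) ∈ s)) := by
      apply List.countP_congr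
      intro r _
      simpa using hmem (r + 1)
    rw [h1]
    exact hperm.countP_eq _
  simp only [hloop, hcount]
  simp [hmem 14, hmem 2]
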